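-- pv_equiv track=rewrite | github.com/Frisked96/ed | menus.py | build_key_map
-- ===== SOURCE A (Python) =====
-- def build_key_map(bindings):
--     key_map = {}
--     for action, key_name in bindings.items():
--         if not key_name or key_name == 'None':
--             continue
--
--         # Preserve case for single characters (v vs V), lowercase for others (Space, UP)
--         if len(key_name) > 1:
--             key_lookup = key_name.lower()
--         else:
--             key_lookup = key_name
--
--         if key_lookup not in key_map:
--             key_map[key_lookup] = []
--         key_map[key_lookup].append(action)
--     return key_map
-- ===== SOURCE B (Python) =====
-- def build_key_map(bindings):
--     def _norm(k):
--         return k.lower() if len(k) > 1 else k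
--     valid = [(action, _norm(key)) for action, key in bindings.items()
--              if key and key != 'None']
--     keys = list(dict.fromkeys(k for _, k in valid))
--     return {k: [a for a, kk in valid if kk == k] for k in keys}
-- ===== Notes on version B (the rewrite author's own statement) =====
-- stated objective: alternative
-- what changed: Replaces A's single-pass incremental dict aggregation (membership test, seed with [], append) with a three-phase grouped construction: filter+normalize into a pair list, dedup the keys in first-occurrence order, then build each group with a per-key comprehension.
import Mathlib
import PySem

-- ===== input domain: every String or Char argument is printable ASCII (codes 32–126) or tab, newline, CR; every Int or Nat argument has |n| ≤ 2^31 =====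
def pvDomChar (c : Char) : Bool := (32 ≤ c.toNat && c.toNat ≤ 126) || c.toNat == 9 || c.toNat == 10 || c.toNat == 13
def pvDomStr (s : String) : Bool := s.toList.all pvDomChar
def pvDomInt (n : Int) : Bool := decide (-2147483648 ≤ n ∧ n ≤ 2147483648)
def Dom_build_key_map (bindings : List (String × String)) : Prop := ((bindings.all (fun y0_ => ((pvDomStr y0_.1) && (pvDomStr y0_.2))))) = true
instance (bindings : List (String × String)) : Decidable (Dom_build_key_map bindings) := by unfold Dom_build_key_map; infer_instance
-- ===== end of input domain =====

-- B replaces A's incremental dict aggregation with a three-phase grouped construction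
-- (filter+normalize, ordered key dedup, per-key gather); alternative decomposition, same results.


-- ===== PORT A =====
def build_key_map (bindings : List (String × String)) : List (String × List String) :=
  (bindings.foldl (fun km p =>
      let action := p.1
      let key_name := p.2
      if key_name = "" ∨ key_name = "None" then km
      else
        let key_lookup := if PySem.Str.len key_name > 1 then PySem.Str.lower key_name else key_name
        let km' := if km.contains key_lookup then km else km.insert key_lookup ([] : List String)
        km'.modify key_lookup [] (fun v => v ++ [action])
    ) (PySem.Dict.empty : PySem.Dict String (List String))).items

-- ===== PORT B =====
def bkmNorm (k : String) : String :=
  if PySem.Str.len k > 1 then PySem.Str.lower k else k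

def bkmValid (bindings : List (String × String)) : List (String × String) :=
  bindings.filterMap (fun p =>
    if p.2 = "" ∨ p.2 = "None" then none else some (p.1, bkmNorm p.2))

def build_key_map_alt (bindings : List (String × String)) : List (String × List String) :=
  let valid := bkmValid bindings
  let keys := PySem.List.dedup (valid.map Prod.snd)
  keys.map (fun k => (k, valid.filterMap (fun q => if q.2 = k then some q.1 else none)))

-- ===== PRECONDITION & SPEC =====
def Spec_build_key_map (bindings : List (String × String)) (out : List (String × List String)) : Prop := out = build_key_map_alt bindings
instance (bindings : List (String × String)) (out : List (String × List String)) : Decidable (Spec_build_key_map bindings out) := by unfold Spec_build_key_map; infer_instance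

-- ===== CLAIM (what is proved, stated in full; the proofs are below) =====
def Claim_equal_build_key_map : Prop := ∀ (bindings : List (String × String)), Dom_build_key_map bindings → Spec_build_key_map bindings (build_key_map bindings)

-- ===== LEMMAS AND PROOFS =====

-- A's "seed with [] if absent, then append" is one modify step.
theorem bkm_two_step (d : PySem.Dict String (List String)) (k : String) (a : String) :
    (if d.contains k then d else d.insert k ([] : List String)).modify k [] (fun v => v ++ [a])
      = d.modify k [] (fun v => v ++ [a]) := by
  by_cases h : d.contains k
  · simp [h]
  · have h0 : d.getD k ([] : List String) = [] :=
      PySem.Dict.getD_of_not_contains d [] (by simpa using h)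
    simp only [h, Bool.false_eq_true, if_false, PySem.Dict.modify,
      PySem.Dict.getD_insert_self, PySem.Dict.insert_insert_self, h0]

-- A's loop over bindings is the modify-loop over the valid (key, action) pairs.
theorem bkm_loop_eq (bindings : List (String × String)) :
    ∀ d : PySem.Dict String (List String),
      bindings.foldl (fun km p =>
        if p.2 = "" ∨ p.2 = "None" then km
        else
          ((if km.contains (if PySem.Str.len p.2 > 1 then PySem.Str.lower p.2 else p.2) then km
            else km.insert (if PySem.Str.len p.2 > 1 then PySem.Str.lower p.2 else p.2) ([] : List String))).modify
            (if PySem.Str.len p.2 > 1 then PySem.Str.lower p.2 else p.2) [] (fun v => v ++ [p.1])) d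
      = ((bkmValid bindings).map (fun q => (q.2, q.1))).foldl
          (fun d q => d.modify q.1 [] (fun v => v ++ [q.2])) d := by
  induction bindings with
  | nil => intro d; rfl
  | cons p rest ih =>
      intro d
      by_cases h : p.2 = "" ∨ p.2 = "None"
      · simp only [List.foldl_cons, bkmValid, List.filterMap_cons, if_pos h]
        exact ih d
      · simp only [List.foldl_cons, bkmValid, List.filterMap_cons, if_neg h,
          List.map_cons]
        rw [bkm_two_step]
        exact ih _

-- B's per-key comprehension is filter-then-project.
theorem bkm_filterMap_eq (l : List (String × String)) (k : String) :
    l.filterMap (fun q => if q.2 = k then some q.1 else none)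
      = (l.filter (fun q => q.2 == k)).map Prod.fst := by
  induction l with
  | nil => rfl
  | cons q rest ih =>
      by_cases h : q.2 = k
      · simp [h, ih]
      · simp [h, ih]

theorem bkm_main (bindings : List (String × String)) :
    build_key_map bindings = build_key_map_alt bindings := by
  unfold build_key_map
  rw [bkm_loop_eq]
  set K := (bkmValid bindings).map (fun q => (q.2, q.1)) with hK
  have hnd : ((K.foldl (fun d q => d.modify q.1 [] (fun v => v ++ [q.2]))
      (PySem.Dict.empty : PySem.Dict String (List String)))).keys.Nodup := by
    exact PySem.Dict.nodup_keys_foldl_modify_key K Prod.fst [] (fun d q v => v ++ [q.2]) _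
      (by simp [PySem.Dict.keys_empty])
  rw [PySem.Dict.items_eq_map_keys _ hnd ([] : List String)]
  rw [PySem.Dict.keys_foldl_modify_key K Prod.fst [] (fun d q v => v ++ [q.2])]
  unfold build_key_map_alt
  simp only [PySem.List.dedup_eq_ofList]
  have hkeys : PySem.Set.update (PySem.Dict.empty : PySem.Dict String (List String)).keys (K.map Prod.fst)
      = PySem.Set.ofList ((bkmValid bindings).map Prod.snd) := by
    rw [hK, List.map_map]
    rfl
  rw [hkeys]
  apply List.map_congr_left
  intro k _
  congr 1
  rw [PySem.Dict.getD_foldl_modify_append K _ k, PySem.Dict.getD_empty, List.nil_append]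
  rw [bkm_filterMap_eq, hK, List.filter_map, List.map_map]
  rfl

-- ===== VERDICT (by name: the statement is the Claim_ definition above) =====
theorem build_key_map_spec : Claim_equal_build_key_map := by
  intro bindings _
  unfold Spec_build_key_map
  exact bkm_main bindings
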